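-- pv_equiv track=rewrite | github.com/HelloYug/MiniPyCodes | Cipher Tools/CipherTools.py | NumberEncrypter
-- ===== SOURCE A (Python) =====
-- code2 = { "1": "A", "2": "B", "3": "C", "4": "D", "5": "E", "6": "F", "7": "G", "8": "H", "9": "I",
--           "10": "J", "11": "K", "12": "L", "13": "M", "14": "N", "15": "O", "16": "P", "17": "Q",
--           "18": "R", "19": "S", "20": "T", "21": "U", "22": "V", "23": "W", "24": "X", "25": "Y", "26": "Z"}
--
-- def NumberEncrypter(phnum):
--     """
--     Encrypts a given number using a pre-defined code mapping.
--
--     Parameters: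
--         phnum (str): The number to be encrypted.
--
--     Returns:
--         str: The encrypted number as a string.
--     """
--     phnum = "".join([char for char in phnum if char != " "])
--
--     while True:
--         try:
--             agnum = int(phnum)
--             break
--         except ValueError:
--             return "Invalid number input"
--
--     absnum = abs(agnum**2)
--     strnum = str(absnum)
--
--     txt = ""
--     count = 0
--
--     for i in range(len(strnum)):
--         try:
--             numnum = int(strnum[i + count])
--             if numnum <= 2:
--                 if numnum == 0:
--                     txt += "0"
--                 else:
--                     val = int(str(numnum) + str(strnum[i + 1 + count]))
--                     if val <= 26:
--                         count += 1
--                         txt += code2.get(str(val), '')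
--                     else:
--                         txt += code2.get(str(numnum), '')
--             else:
--                 txt += code2.get(str(numnum), '')
--         except IndexError:
--             if count + i == len(strnum) - 1:
--                 txt += code2.get(str(strnum[-1]), '')
--                 break
--     return txt
-- ===== SOURCE B (Python) =====
-- def NumberEncrypter(phnum):
--     cleaned = "".join([char for char in phnum if char != " "])
--     try:
--         agnum = int(cleaned)
--     except ValueError:
--         return "Invalid number input"
--     return _encode(str(agnum * agnum))
--
-- def _encode(s):
--     # Recursively decode the digit string: each call consumes one or two leading
--     # digits and computes the letter arithmetically (chr), no lookup table.
--     if s == "":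
--         return ""
--     v = int(s[0])
--     if v == 0:
--         return "0" + _encode(s[1:])
--     if v <= 2 and len(s) >= 2 and int(s[:2]) <= 26:
--         return chr(ord("A") + int(s[:2]) - 1) + _encode(s[2:])
--     return chr(ord("A") + v - 1) + _encode(s[1:])
-- ===== Notes on version B (the rewrite author's own statement) =====
-- stated objective: alternative
-- what changed: Drops the lookup dict and the range-loop with skip counter and caught IndexErrors entirely: B decodes by structural recursion on the digit string, each call consuming one or two leading digits via slices and computing each letter arithmetically with chr from the alphabet base instead of a table.
import Mathlib
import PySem

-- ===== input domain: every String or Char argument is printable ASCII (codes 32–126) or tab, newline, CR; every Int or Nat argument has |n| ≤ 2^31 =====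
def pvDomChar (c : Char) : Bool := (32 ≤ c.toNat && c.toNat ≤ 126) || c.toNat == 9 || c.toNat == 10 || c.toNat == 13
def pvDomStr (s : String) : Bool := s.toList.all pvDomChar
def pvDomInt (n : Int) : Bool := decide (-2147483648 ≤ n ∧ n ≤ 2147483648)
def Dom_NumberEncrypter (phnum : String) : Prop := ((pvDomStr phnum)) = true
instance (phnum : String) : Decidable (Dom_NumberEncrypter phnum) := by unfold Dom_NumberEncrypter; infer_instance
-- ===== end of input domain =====

-- B replaces A's lookup dict, range-loop with skip counter and caught IndexErrors by
-- structural recursion on the digit string with chr-arithmetic letters (objective: alternative).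
-- Strings are ported through List Char (PySem convention).

-- ===== PORT A =====

def code2 : PySem.Dict (List Char) (List Char) := PySem.Dict.ofList
  [ (['1'],['A']), (['2'],['B']), (['3'],['C']), (['4'],['D']), (['5'],['E']), (['6'],['F'])
  , (['7'],['G']), (['8'],['H']), (['9'],['I'])
  , (['1','0'],['J']), (['1','1'],['K']), (['1','2'],['L']), (['1','3'],['M']), (['1','4'],['N'])
  , (['1','5'],['O']), (['1','6'],['P']), (['1','7'],['Q']), (['1','8'],['R']), (['1','9'],['S'])
  , (['2','0'],['T']), (['2','1'],['U']), (['2','2'],['V']), (['2','3'],['W']), (['2','4'],['X'])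
  , (['2','5'],['Y']), (['2','6'],['Z']) ]

-- A's for-loop: 'for i in range(len(strnum))' with mutable txt/count and a try/except
-- around the two indexings; 'break' is modelled by returning txt directly.
-- Indices i+count / i+1+count are nonnegative, so cs[·]? is exactly Python's strnum[·]
-- (none = the caught IndexError); strnum[-1] is PySem.List.pyGet? cs (-1).
def loopA (cs : List Char) (txt : List Char) (count : Nat) (i : Nat) : List Char :=
  if _h : i < cs.length then
    match cs[i + count]? with
    | some c =>
      -- numnum := int(strnum[i + count]); exact since strnum's characters are decimal digits
      if ((c.toNat : Int) - 48) ≤ 2 then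
        if ((c.toNat : Int) - 48) = 0 then loopA cs (txt ++ ['0']) count (i+1)
        else
          match cs[i + 1 + count]? with
          | some c2 =>
            -- val := int(str(numnum) + str(strnum[i + 1 + count])); always parses here (digit chars)
            if (PySem.Int.ofChars? (PySem.Int.toChars ((c.toNat : Int) - 48) ++ [c2])).getD 0 ≤ 26 then
              loopA cs (txt ++ code2.getD (PySem.Int.toChars ((PySem.Int.ofChars? (PySem.Int.toChars ((c.toNat : Int) - 48) ++ [c2])).getD 0)) []) (count+1) (i+1)
            else
              loopA cs (txt ++ code2.getD (PySem.Int.toChars ((c.toNat : Int) - 48)) []) count (i+1)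
          | none => -- IndexError from strnum[i + 1 + count]
            if count + i = cs.length - 1 then
              txt ++ code2.getD ((PySem.List.pyGet? cs (-1)).elim [] ([·])) []  -- then break
            else loopA cs txt count (i+1)
      else loopA cs (txt ++ code2.getD (PySem.Int.toChars ((c.toNat : Int) - 48)) []) count (i+1)
    | none => -- IndexError from strnum[i + count]
      if count + i = cs.length - 1 then
        txt ++ code2.getD ((PySem.List.pyGet? cs (-1)).elim [] ([·])) []  -- then break
      else loopA cs txt count (i+1)
  else txt
termination_by cs.length - i

def NumberEncrypter (phnum : String) : String :=
  let cleaned := phnum.toList.filter (fun c => c ≠ ' ')   -- "".join([char for char in phnum if char != " "])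
  match PySem.Int.ofChars? cleaned with                    -- int(phnum); none = the caught ValueError
  | none => "Invalid number input"
  | some agnum =>
    let strnum := PySem.Int.toChars (|agnum ^ 2|)          -- str(abs(agnum**2))
    String.ofList (loopA strnum [] 0 0)

-- ===== PORT B =====

-- B's _encode: structural recursion on the digit string; each call consumes one or
-- two leading digits (slices s[:2], s[1:], s[2:]) and computes the letter as
-- chr(ord('A') + v - 1); int(s[0]) / int(s[:2]) are exact on digit chars, and
-- (65 + v - 1).toNat is exact since v ≥ 1 in the branches that use it.
def encB : List Char → List Char
  | [] => []
  | c :: rest =>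
    if ((c.toNat : Int) - 48) = 0 then
      '0' :: encB rest
    else if ((c.toNat : Int) - 48) ≤ 2 ∧ 2 ≤ (c :: rest).length
            ∧ (PySem.Int.ofChars? ((c :: rest).take 2)).getD 0 ≤ 26 then
      Char.ofNat ((65 + (PySem.Int.ofChars? ((c :: rest).take 2)).getD 0 - 1).toNat)
        :: encB ((c :: rest).drop 2)
    else
      Char.ofNat ((65 + ((c.toNat : Int) - 48) - 1).toNat) :: encB rest
termination_by s => s.length
decreasing_by all_goals (simp; try omega)

def NumberEncrypter_alt (phnum : String) : String :=
  let cleaned := phnum.toList.filter (fun c => c ≠ ' ')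
  match PySem.Int.ofChars? cleaned with
  | none => "Invalid number input"
  | some agnum =>
    String.ofList (encB (PySem.Int.toChars (agnum * agnum)))   -- str(agnum * agnum)

-- ===== PRECONDITION & SPEC =====
def Spec_NumberEncrypter (phnum : String) (out : String) : Prop := out = NumberEncrypter_alt phnum
instance (phnum : String) (out : String) : Decidable (Spec_NumberEncrypter phnum out) := by unfold Spec_NumberEncrypter; infer_instance

-- ===== CLAIM =====
def Claim_equal_NumberEncrypter : Prop := ∀ (phnum : String), Dom_NumberEncrypter phnum → Spec_NumberEncrypter phnum (NumberEncrypter phnum)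

-- ===== LEMMAS AND PROOFS =====

def pvDIGITS : List Char := ['0','1','2','3','4','5','6','7','8','9']

theorem pv_toDigitsCore_succ (n : Nat) (f : Nat) (acc : List Char) :
    Nat.toDigitsCore 10 (f+1) n acc =
      if n / 10 = 0 then (n % 10).digitChar :: acc
      else Nat.toDigitsCore 10 f (n / 10) ((n % 10).digitChar :: acc) := by
  simp [Nat.toDigitsCore]

theorem pv_digitChar_mem (n : Nat) : (n % 10).digitChar ∈ pvDIGITS := by
  have h10 : n % 10 < 10 := Nat.mod_lt _ (by omega)
  interval_cases (n % 10) <;> decide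

theorem pv_mem_toDigitsCore (f : Nat) : ∀ (n : Nat) (acc : List Char) (c : Char),
    c ∈ Nat.toDigitsCore 10 f n acc → c ∈ acc ∨ c ∈ pvDIGITS := by
  induction f with
  | zero => intro n acc c h; exact Or.inl h
  | succ f ih =>
    intro n acc c h
    rw [pv_toDigitsCore_succ] at h
    by_cases hz : n / 10 = 0
    · rw [if_pos hz] at h
      rcases List.mem_cons.mp h with h | h
      · exact Or.inr (h ▸ pv_digitChar_mem n)
      · exact Or.inl h
    · rw [if_neg hz] at h
      rcases ih _ _ _ h with h' | h'
      · rcases List.mem_cons.mp h' with h' | h'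
        · exact Or.inr (h' ▸ pv_digitChar_mem n)
        · exact Or.inl h'
      · exact Or.inr h'

theorem pv_digits_toChars (m : Int) (hm : 0 ≤ m) :
    ∀ c ∈ PySem.Int.toChars m, c ∈ pvDIGITS := by
  intro c hc
  unfold PySem.Int.toChars at hc
  rw [if_neg (by omega)] at hc
  rcases pv_mem_toDigitsCore _ _ _ _ hc with h | h
  · simp at h
  · exact h

-- per-digit facts, proved by exhausting the ten digit characters
theorem pv_toChars_digit (c : Char) (hc : c ∈ pvDIGITS) :
    PySem.Int.toChars ((c.toNat : Int) - 48) = [c] := by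
  fin_cases hc <;> decide

theorem pv_numnum_le_two (c : Char) (hc : c ∈ pvDIGITS) :
    ((c.toNat : Int) - 48 ≤ 2) ↔ (c = '0' ∨ c = '1' ∨ c = '2') := by
  fin_cases hc <;> simp

-- A's single-digit lookup equals B's chr arithmetic, digit by digit
theorem pv_code_single (c : Char) (hc : c ∈ pvDIGITS) (h0 : ¬ ((c.toNat : Int) - 48) = 0) :
    code2.getD [c] [] = [Char.ofNat ((65 + ((c.toNat : Int) - 48) - 1).toNat)] := by
  fin_cases hc <;> first | (exact absurd rfl h0) | decide

-- A's two-digit lookup equals B's chr arithmetic, pair by pair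
theorem pv_code_pair (c c2 : Char) (hc : c = '1' ∨ c = '2') (hc2 : c2 ∈ pvDIGITS)
    (h26 : (PySem.Int.ofChars? [c, c2]).getD 0 ≤ 26) :
    code2.getD (PySem.Int.toChars ((PySem.Int.ofChars? [c, c2]).getD 0)) []
      = [Char.ofNat ((65 + (PySem.Int.ofChars? [c, c2]).getD 0 - 1).toNat)] := by
  rcases hc with hc | hc <;> subst hc <;> fin_cases hc2 <;> revert h26 <;> decide

-- the heart: A's indexed loop with skip counter equals B's recursion on the suffix at i + count
theorem pv_loopA_eq_encB (cs : List Char) (hdig : ∀ c ∈ cs, c ∈ pvDIGITS) :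
    ∀ (n i count : Nat) (txt : List Char), cs.length - i ≤ n →
      loopA cs txt count i = txt ++ encB (cs.drop (i + count)) := by
  intro n
  induction n with
  | zero =>
    intro i count txt hn
    rw [loopA, dif_neg (by omega : ¬ i < cs.length),
        List.drop_eq_nil_of_le (by omega : cs.length ≤ i + count), encB]
    simp
  | succ n ih =>
    intro i count txt hn
    by_cases hi : i < cs.length
    · rw [loopA, dif_pos hi]
      by_cases hpos : i + count < cs.length
      · have hc : cs[i + count]? = some cs[i + count] := List.getElem?_eq_getElem hpos
        have hcd : cs[i + count] ∈ pvDIGITS := hdig _ (List.getElem_mem hpos)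
        have hdrop : cs.drop (i + count) = cs[i + count] :: cs.drop (i + count + 1) :=
          List.drop_eq_getElem_cons hpos
        rw [hdrop, encB]
        simp only [hc]
        set c := cs[i + count] with hcdef
        by_cases hle2 : (c.toNat : Int) - 48 ≤ 2
        · rw [if_pos hle2]
          by_cases h0 : (c.toNat : Int) - 48 = 0
          · rw [if_pos h0, if_pos h0, ih (i+1) count (txt ++ ['0']) (by omega)]
            have : i + 1 + count = i + count + 1 := by omega
            rw [this]
            simp
          · have hc12 : c = '1' ∨ c = '2' := by
              rcases (pv_numnum_le_two c hcd).mp hle2 with h | h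
              · exact absurd (by rw [h]; decide) h0
              · exact h
            rw [if_neg h0, if_neg h0]
            by_cases hpos1 : i + 1 + count < cs.length
            · have hpos1' : i + count + 1 < cs.length := by omega
              have hc2 : cs[i + 1 + count]? = some cs[i + 1 + count] := List.getElem?_eq_getElem hpos1
              have hc2d : cs[i + 1 + count] ∈ pvDIGITS := hdig _ (List.getElem_mem hpos1)
              have hdrop1 : cs.drop (i + count + 1) = cs[i + count + 1] :: cs.drop (i + count + 2) :=
                List.drop_eq_getElem_cons hpos1'
              have hidx : cs[i + count + 1] = cs[i + 1 + count] := by congr 1; omega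
              simp only [hc2]
              rw [hdrop1, hidx, pv_toChars_digit c hcd]
              set c2 := cs[i + 1 + count] with hc2def
              have htake : (c :: c2 :: cs.drop (i + count + 2)).take 2 = [c, c2] := rfl
              simp only [List.singleton_append, htake]
              by_cases h26 : (PySem.Int.ofChars? [c, c2]).getD 0 ≤ 26
              · rw [if_pos h26,
                    if_pos (⟨hle2, by simp, h26⟩ :
                      ((c.toNat : Int) - 48 ≤ 2 ∧ 2 ≤ (c :: c2 :: cs.drop (i + count + 2)).length
                        ∧ (PySem.Int.ofChars? [c, c2]).getD 0 ≤ 26)),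
                    pv_code_pair c c2 hc12 hc2d h26,
                    ih (i+1) (count+1) _ (by omega)]
                have : i + 1 + (count + 1) = i + count + 2 := by omega
                rw [this]
                simp
              · rw [if_neg h26,
                    if_neg (by
                      intro h
                      exact h26 h.2.2),
                    pv_code_single c hcd h0,
                    ih (i+1) count _ (by omega)]
                have : i + 1 + count = i + count + 1 := by omega
                rw [this, hdrop1, hidx]
                simp
            · -- last character is '1' or '2': A catches IndexError, B falls to the one-digit branch
              have hc2 : cs[i + 1 + count]? = none := List.getElem?_eq_none (by omega)
              simp only [hc2]
              have hlast : count + i = cs.length - 1 := by omega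
              rw [if_pos hlast]
              have hdropnil : cs.drop (i + count + 1) = [] :=
                List.drop_eq_nil_of_le (by omega)
              have hget : PySem.List.pyGet? cs (-1) = some c := by
                rw [PySem.List.pyGet?_neg_ofNat cs 1 (by omega) (by omega)]
                have hl1 : cs.length - 1 = i + count := by omega
                rw [hl1, List.getElem?_eq_getElem hpos, hcdef]
              rw [hget, hdropnil]
              rw [if_neg (by
                    intro h
                    have := h.2.1
                    simp at this)]
              rw [encB]
              simp [pv_code_single c hcd h0]
        · -- a digit 3..9: single letter in both
          have hc12' : ¬ ((c.toNat : Int) - 48 ≤ 2 ∧ 2 ≤ (c :: cs.drop (i + count + 1)).length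
              ∧ (PySem.Int.ofChars? ((c :: cs.drop (i + count + 1)).take 2)).getD 0 ≤ 26) := by
            intro h; exact hle2 h.1
          have h0 : ¬ ((c.toNat : Int) - 48) = 0 := by
            intro h; exact hle2 (by rw [h]; decide)
          rw [if_neg hle2, if_neg h0, if_neg hc12', pv_toChars_digit c hcd,
              pv_code_single c hcd h0, ih (i+1) count _ (by omega)]
          have : i + 1 + count = i + count + 1 := by omega
          rw [this]
          simp
      · -- i < len but i + count ran past the end: A iterates idly, B's suffix is already empty
        have hc : cs[i + count]? = none := List.getElem?_eq_none (by omega)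
        rw [hc, if_neg (by omega : ¬ count + i = cs.length - 1), ih (i+1) count txt (by omega),
            List.drop_eq_nil_of_le (by omega : cs.length ≤ i + 1 + count),
            List.drop_eq_nil_of_le (by omega : cs.length ≤ i + count)]
    · rw [loopA, dif_neg hi,
          List.drop_eq_nil_of_le (by omega : cs.length ≤ i + count), encB]
      simp

-- ===== VERDICT =====
theorem NumberEncrypter_spec : Claim_equal_NumberEncrypter := by
  intro phnum _
  unfold Spec_NumberEncrypter NumberEncrypter NumberEncrypter_alt
  cases h : PySem.Int.ofChars? (phnum.toList.filter (fun c => c ≠ ' ')) with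
  | none => simp only [h]
  | some agnum =>
    simp only [h]
    have hsq : (|agnum ^ 2| : Int) = agnum * agnum := by
      rw [sq, abs_of_nonneg (mul_self_nonneg agnum)]
    rw [hsq]
    have hdig := pv_digits_toChars (agnum * agnum) (mul_self_nonneg agnum)
    rw [pv_loopA_eq_encB _ hdig (PySem.Int.toChars (agnum * agnum)).length 0 0 [] (by omega)]
    simp
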